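-- pv_equiv track=rewrite | github.com/Kavuti/advent-of-code-2023 | 10/main.py | find_enclosed
-- ===== SOURCE A (Python) =====
-- def find_enclosed(lines, path):
--     chars = ["L", "J", "|", "S"]
--     others = ["F", "7", "|", "S"]
--
--     enclosed = 0
--     for i in range(len(lines)):
--         for j in range(len(lines[i])):
--             if not (i, j) in path:
--                 firsts = sum([lines[i][: j + 1].count(c) for c in chars])
--                 seconds = sum([lines[i][: j + 1].count(c) for c in others])
--                 if firsts % 2 == 1 and seconds % 2 == 1:
--                     enclosed += 1
--     return enclosed
-- ===== SOURCE B (Python) =====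
-- def find_enclosed(lines, path):
--     # One pass per row: keep running parities of the two crossing-character
--     # counts instead of recounting the whole prefix for every cell.
--     path_set = set(path)
--     enclosed = 0
--     for i, line in enumerate(lines):
--         p1 = 0  # parity of count of "L","J","|","S" in line[:j+1]
--         p2 = 0  # parity of count of "F","7","|","S" in line[:j+1]
--         for j, c in enumerate(line):
--             if c in "LJ|S":
--                 p1 = 1 - p1
--             if c in "F7|S":
--                 p2 = 1 - p2
--             if (i, j) not in path_set and p1 == 1 and p2 == 1:
--                 enclosed += 1
--     return enclosed
-- ===== Notes on version B (the rewrite author's own statement) =====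
-- stated objective: faster
-- what changed: Instead of recounting the four crossing characters in the whole row prefix lines[i][:j+1] for every cell, B keeps two running parity bits per row (updated in O(1) per character) and checks the path via a prebuilt set, turning O(n*m^2) work into one O(n*m) pass.
import Mathlib
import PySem

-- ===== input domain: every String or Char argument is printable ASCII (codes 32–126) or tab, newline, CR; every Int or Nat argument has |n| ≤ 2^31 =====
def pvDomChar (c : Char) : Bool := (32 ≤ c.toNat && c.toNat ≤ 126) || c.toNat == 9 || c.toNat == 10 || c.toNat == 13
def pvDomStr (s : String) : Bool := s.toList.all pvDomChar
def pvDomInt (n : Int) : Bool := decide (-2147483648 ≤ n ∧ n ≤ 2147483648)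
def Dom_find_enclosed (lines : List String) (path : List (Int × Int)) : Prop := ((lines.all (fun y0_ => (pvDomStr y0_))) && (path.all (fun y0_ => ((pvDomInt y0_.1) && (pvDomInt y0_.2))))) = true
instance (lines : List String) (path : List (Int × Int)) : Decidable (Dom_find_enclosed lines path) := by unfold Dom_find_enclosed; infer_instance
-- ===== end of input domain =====

-- B replaces A's per-cell recount of the whole row prefix by running parities
-- maintained in one pass per row (objective: faster, O(n·m) vs O(n·m²)).

-- ===== PORT A =====
-- chars = ["L", "J", "|", "S"] ; others = ["F", "7", "|", "S"]
def pvChars1 : List Char := ['L', 'J', '|', 'S']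
def pvChars2 : List Char := ['F', '7', '|', 'S']

-- 'for i in range(len(lines)) … lines[i]' / 'for j in range(len(lines[i]))' rendered as
-- folds over PySem.List.enumerate (same indices, same values); lines[i][:j+1] is a PySem slice;
-- str.count(c) for a single character c is List.count on the characters.
def find_enclosed (lines : List String) (path : List (Int × Int)) : Int :=
  (PySem.List.enumerate lines 0).foldl (fun enclosed iln =>
    (PySem.List.enumerate iln.2.toList 0).foldl (fun enclosed jc =>
      if (iln.1, jc.1) ∈ path then enclosed
      else
        let pref := PySem.List.slice iln.2.toList none (some (jc.1 + 1))
        let firsts := (pvChars1.map (fun c => pref.count c)).sum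
        let seconds := (pvChars2.map (fun c => pref.count c)).sum
        if firsts % 2 = 1 ∧ seconds % 2 = 1 then enclosed + 1 else enclosed)
      enclosed) 0

-- ===== PORT B =====
-- path_set = set(path); per row the state is (p1, p2, enclosed); 'c in "LJ|S"' is
-- membership of the character in the string's characters.
def find_enclosed_alt (lines : List String) (path : List (Int × Int)) : Int :=
  let pathSet := PySem.Set.ofList path
  (PySem.List.enumerate lines 0).foldl (fun enclosed iln =>
    ((PySem.List.enumerate iln.2.toList 0).foldl (fun st jc =>
      let p1 : Int := if jc.2 ∈ pvChars1 then 1 - st.1 else st.1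
      let p2 : Int := if jc.2 ∈ pvChars2 then 1 - st.2.1 else st.2.1
      let acc : Int := if (iln.1, jc.1) ∉ pathSet ∧ p1 = 1 ∧ p2 = 1 then st.2.2 + 1 else st.2.2
      (p1, p2, acc)) ((0 : Int), (0 : Int), enclosed)).2.2) 0

-- ===== PRECONDITION & SPEC =====
def Spec_find_enclosed (lines : List String) (path : List (Int × Int)) (out : Int) : Prop := out = find_enclosed_alt lines path
instance (lines : List String) (path : List (Int × Int)) (out : Int) : Decidable (Spec_find_enclosed lines path out) := by unfold Spec_find_enclosed; infer_instance

-- ===== CLAIM (what is proved, stated in full; the proofs are below) =====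
def Claim_equal_find_enclosed : Prop := ∀ (lines : List String) (path : List (Int × Int)), Dom_find_enclosed lines path → Spec_find_enclosed lines path (find_enclosed lines path)

-- ===== LEMMAS AND PROOFS =====

def pvSumCounts (chs l : List Char) : Nat := (chs.map (fun c => l.count c)).sum

lemma pvSumCounts_append (chs l : List Char) (c : Char) :
    pvSumCounts chs (l ++ [c]) = pvSumCounts chs l + chs.count c := by
  induction chs with
  | nil => simp [pvSumCounts]
  | cons d chs ih =>
    simp only [pvSumCounts, List.map_cons, List.sum_cons] at ih ⊢
    rw [List.count_append, ih]
    by_cases h : c = d <;>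
      simp [eq_comm, h] <;> omega

lemma pvCount1 (c : Char) : pvChars1.count c = if c ∈ pvChars1 then 1 else 0 := by
  by_cases h : c ∈ pvChars1
  · rw [if_pos h]; fin_cases h <;> rfl
  · rw [if_neg h]
    simp only [pvChars1, List.mem_cons, List.not_mem_nil, or_false, not_or] at h
    obtain ⟨h1, h2, h3, h4⟩ := h
    simp [pvChars1, eq_comm, h1, h2, h3, h4]

lemma pvCount2 (c : Char) : pvChars2.count c = if c ∈ pvChars2 then 1 else 0 := by
  by_cases h : c ∈ pvChars2
  · rw [if_pos h]; fin_cases h <;> rfl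
  · rw [if_neg h]
    simp only [pvChars2, List.mem_cons, List.not_mem_nil, or_false, not_or] at h
    obtain ⟨h1, h2, h3, h4⟩ := h
    simp [pvChars2, eq_comm, h1, h2, h3, h4]

lemma pv_row_eq (path : List (Int × Int)) (i : Int) (cs : List Char) :
    ∀ (suf pre : List Char) (acc : Int),
      cs = pre ++ suf →
      (PySem.List.enumerate suf (pre.length : Int)).foldl (fun enclosed jc =>
        if (i, jc.1) ∈ path then enclosed
        else
          let pref := PySem.List.slice cs none (some (jc.1 + 1))
          let firsts := (pvChars1.map (fun c => pref.count c)).sum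
          let seconds := (pvChars2.map (fun c => pref.count c)).sum
          if firsts % 2 = 1 ∧ seconds % 2 = 1 then enclosed + 1 else enclosed) acc
      = ((PySem.List.enumerate suf (pre.length : Int)).foldl (fun st jc =>
          let p1 : Int := if jc.2 ∈ pvChars1 then 1 - st.1 else st.1
          let p2 : Int := if jc.2 ∈ pvChars2 then 1 - st.2.1 else st.2.1
          let acc : Int := if (i, jc.1) ∉ PySem.Set.ofList path ∧ p1 = 1 ∧ p2 = 1 then st.2.2 + 1 else st.2.2
          (p1, p2, acc))
          (((pvSumCounts pvChars1 pre % 2 : Nat) : Int),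
           ((pvSumCounts pvChars2 pre % 2 : Nat) : Int), acc)).2.2 := by
  intro suf
  induction suf with
  | nil => intro pre acc _; simp
  | cons c rest ih =>
    intro pre acc hcs
    rw [PySem.List.enumerate_cons, List.foldl_cons, List.foldl_cons]
    have hcast : ((pre.length : Int) + 1) = ((pre.length + 1 : Nat) : Int) := by push_cast; ring
    have hslice : PySem.List.slice cs none (some ((pre.length : Int) + 1)) = pre ++ [c] := by
      rw [hcast, PySem.List.slice_to_natCast, hcs, Nat.add_comm, List.take_append]
      simp
    have e1 : (if c ∈ pvChars1 then 1 - ((pvSumCounts pvChars1 pre % 2 : Nat) : Int)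
               else ((pvSumCounts pvChars1 pre % 2 : Nat) : Int))
        = ((pvSumCounts pvChars1 (pre ++ [c]) % 2 : Nat) : Int) := by
      rw [pvSumCounts_append, pvCount1]
      by_cases h : c ∈ pvChars1 <;> simp only [h, if_true, if_false] <;> push_cast <;> omega
    have e2 : (if c ∈ pvChars2 then 1 - ((pvSumCounts pvChars2 pre % 2 : Nat) : Int)
               else ((pvSumCounts pvChars2 pre % 2 : Nat) : Int))
        = ((pvSumCounts pvChars2 (pre ++ [c]) % 2 : Nat) : Int) := by
      rw [pvSumCounts_append, pvCount2]
      by_cases h : c ∈ pvChars2 <;> simp only [h, if_true, if_false] <;> push_cast <;> omega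
    simp only [hslice, e1, e2]
    have hcs' : cs = (pre ++ [c]) ++ rest := by simpa using hcs
    have ihx := ih (pre ++ [c])
    simp only [List.length_append, List.length_cons, List.length_nil] at ihx
    have hl : ((pre.length + (0 + 1) : Nat) : Int) = (pre.length : Int) + 1 := by push_cast; ring
    rw [hl] at ihx
    simp only [PySem.Set.mem_ofList, pvSumCounts] at ihx ⊢
    set P := (i, (pre.length : Int)) ∈ path with hP
    set n1 := (List.map (fun x => List.count x (pre ++ [c])) pvChars1).sum with hn1
    set n2 := (List.map (fun x => List.count x (pre ++ [c])) pvChars2).sum with hn2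
    have ha : (if ¬P ∧ ((n1 % 2 : Nat) : Int) = 1 ∧ ((n2 % 2 : Nat) : Int) = 1 then acc + 1 else acc)
        = (if P then acc else if n1 % 2 = 1 ∧ n2 % 2 = 1 then acc + 1 else acc) := by
      by_cases hp : P
      · simp [hp]
      · rw [if_neg hp]
        simp only [hp, not_false_iff, true_and]
        exact if_congr (by omega) rfl rfl
    rw [ha]
    exact ihx _ hcs'

-- ===== VERDICT (by name: the statement is the Claim_ definition above) =====
theorem find_enclosed_spec : Claim_equal_find_enclosed := by
  intro lines path _
  unfold Spec_find_enclosed find_enclosed find_enclosed_alt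
  simp only []
  congr 1
  funext enclosed iln
  have h := pv_row_eq path iln.1 iln.2.toList iln.2.toList [] enclosed rfl
  simpa [pvSumCounts] using h
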